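-- pv_equiv track=rewrite | github.com/syeddabeer/python_codingame | code4life.py | separate_files
-- ===== SOURCE A (Python) =====
-- def separate_files(files):
--     player_files = []    # files of the player
--     other_files = []    # files of the opponent
--     cloud_files = []    # files in the cloud
--
--     for file in files:
--         if file["carried_by"] == 0:
--             player_files.append(file)
--         elif file["carried_by"] == 1:
--             other_files.append(file)
--         elif file["carried_by"] == -1:
--             cloud_files.append(file)
--
--     return player_files, other_files, cloud_files
-- ===== SOURCE B (Python) =====
-- def separate_files(files):
--     def carried(k):
--         return [f for f in files if f["carried_by"] == k]
--     return carried(0), carried(1), carried(-1)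
-- ===== Notes on version B (the rewrite author's own statement) =====
-- stated objective: simpler
-- what changed: Replaces the single accumulating loop with an if/elif chain by three independent filter passes over the list (one comprehension per bucket), with no accumulators or branching.
import Mathlib
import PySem

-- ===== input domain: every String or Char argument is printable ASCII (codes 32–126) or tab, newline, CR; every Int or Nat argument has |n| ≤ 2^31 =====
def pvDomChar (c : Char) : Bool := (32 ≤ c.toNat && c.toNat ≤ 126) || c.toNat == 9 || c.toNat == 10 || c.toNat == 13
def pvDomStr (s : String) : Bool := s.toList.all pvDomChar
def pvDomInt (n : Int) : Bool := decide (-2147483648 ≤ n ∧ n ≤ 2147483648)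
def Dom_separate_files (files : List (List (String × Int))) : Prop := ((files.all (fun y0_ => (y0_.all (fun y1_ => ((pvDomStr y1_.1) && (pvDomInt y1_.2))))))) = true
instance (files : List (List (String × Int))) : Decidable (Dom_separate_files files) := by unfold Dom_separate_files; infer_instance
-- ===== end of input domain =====

-- B replaces A's single accumulating loop (if/elif chain into three named lists) by
-- three independent filter passes over the list, one per bucket (simpler; same value).

-- shared helper: file["carried_by"] (a Python dict lookup; none = KeyError, excluded by Pre_)
def pvCarriedBy? (file : List (String × Int)) : Option Int :=
  (PySem.Dict.ofList file).get? "carried_by"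

-- ===== PORT A =====
-- one step of A's loop: the if/elif chain appending to one of the three lists
def pvSepStepA (acc : (List (List (String × Int))) × (List (List (String × Int))) × (List (List (String × Int))))
    (file : List (String × Int)) : (List (List (String × Int))) × (List (List (String × Int))) × (List (List (String × Int))) :=
  match pvCarriedBy? file with
  | none => acc   -- Python raises KeyError here; such inputs are excluded by Pre_
  | some k =>
    if k = 0 then (acc.1 ++ [file], acc.2.1, acc.2.2)
    else if k = 1 then (acc.1, acc.2.1 ++ [file], acc.2.2)
    else if k = -1 then (acc.1, acc.2.1, acc.2.2 ++ [file])
    else acc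

def separate_files (files : List (List (String × Int))) : (List (List (String × Int))) × (List (List (String × Int))) × (List (List (String × Int))) :=
  files.foldl pvSepStepA ([], [], [])

-- ===== PORT B =====
-- B's helper carried(k): [f for f in files if f["carried_by"] == k]
def pvCarried (files : List (List (String × Int))) (k : Int) : List (List (String × Int)) :=
  files.filter (fun f => pvCarriedBy? f == some k)

def separate_files_alt (files : List (List (String × Int))) : (List (List (String × Int))) × (List (List (String × Int))) × (List (List (String × Int))) :=
  (pvCarried files 0, pvCarried files 1, pvCarried files (-1))

-- ===== PRECONDITION & SPEC =====
-- Pre_: every file has the "carried_by" key; on a file without it the Python A raises KeyError.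
def Pre_separate_files (files : List (List (String × Int))) : Prop :=
  ∀ f ∈ files, (PySem.Dict.ofList f).contains "carried_by" = true
instance (files : List (List (String × Int))) : Decidable (Pre_separate_files files) := by unfold Pre_separate_files; infer_instance

def pvWitness_separate_files : (List (List (String × Int))) := [[("carried_by", 0), ("id", 7)], [("carried_by", -1)]]

def Spec_separate_files (files : List (List (String × Int))) (out : (List (List (String × Int))) × (List (List (String × Int))) × (List (List (String × Int)))) : Prop := out = separate_files_alt files
instance (files : List (List (String × Int))) (out : (List (List (String × Int))) × (List (List (String × Int))) × (List (List (String × Int)))) : Decidable (Spec_separate_files files out) := by unfold Spec_separate_files; infer_instance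

-- ===== CLAIM (what is proved, stated in full; the proofs are below) =====
def Claim_equal_separate_files : Prop := ∀ (files : List (List (String × Int))), Dom_separate_files files → Pre_separate_files files → Spec_separate_files files (separate_files files)

-- ===== LEMMAS AND PROOFS =====

-- invariant of A's fold: starting from (a,b,c) it appends exactly the three filters.
lemma pvSep_foldA (files : List (List (String × Int)))
    (a b c : List (List (String × Int))) :
    files.foldl pvSepStepA (a, b, c)
      = (a ++ pvCarried files 0, b ++ pvCarried files 1, c ++ pvCarried files (-1)) := by
  induction files generalizing a b c with
  | nil => simp [pvCarried]
  | cons f fs ih =>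
    simp only [List.foldl_cons]
    cases h : pvCarriedBy? f with
    | none =>
      simp [pvSepStepA, h, ih, pvCarried]
    | some k =>
      by_cases h0 : k = 0 <;> by_cases h1 : k = 1 <;> by_cases hm : k = -1 <;>
        simp_all [pvSepStepA, pvCarried]

-- ===== VERDICT (by name: the statement is the Claim_ definition above) =====
theorem separate_files_spec : Claim_equal_separate_files := by
  intro files _ _
  unfold Spec_separate_files separate_files separate_files_alt
  simp [pvSep_foldA]
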